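-- pv_equiv track=rewrite | github.com/ethanheinrick01-ctrl/bait-engine-v2 | src/bait_engine/adapters/compiler.py | _strip_blend_prefix
-- ===== SOURCE A (Python) =====
-- _BLEND_PREFIXES = {
--     "small correction",
--     "premise check",
--     "quick calibration",
--     "translation",
--     "let's tighten this",
--     "version that survives contact",
--     "if we're scoring rigor",
--     "mechanically",
--     "clean room pass",
--     "diagnosis",
--     "reality check",
--     "in one line",
--     "plain terms",
--     "premise first",
--     "quick question",
-- }
--
-- def _strip_blend_prefix(text: str) -> str:
--     cleaned = " ".join((text or "").strip().split())
--     lowered = cleaned.lower()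
--     for prefix in sorted(_BLEND_PREFIXES, key=len, reverse=True):
--         token = f"{prefix}, "
--         if lowered.startswith(token):
--             return cleaned[len(token):].strip()
--     return cleaned
-- ===== SOURCE B (Python) =====
-- _BLEND_PREFIXES = {
--     "small correction",
--     "premise check",
--     "quick calibration",
--     "translation",
--     "let's tighten this",
--     "version that survives contact",
--     "if we're scoring rigor",
--     "mechanically",
--     "clean room pass",
--     "diagnosis",
--     "reality check",
--     "in one line",
--     "plain terms",
--     "premise first",
--     "quick question",
-- }
--
-- def _strip_blend_prefix(text: str) -> str:
--     cleaned = " ".join((text or "").strip().split())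
--     lowered = cleaned.lower()
--     i = lowered.find(", ")
--     if i != -1 and lowered[:i] in _BLEND_PREFIXES:
--         return cleaned[i + 2:].strip()
--     return cleaned
-- ===== Notes on version B (the rewrite author's own statement) =====
-- stated objective: simpler
-- what changed: Instead of scanning all 15 prefixes length-sorted and testing startswith for each, B locates the first comma-space separator once and does a single set-membership lookup on the text before it (valid because no prefix contains a comma).
import Mathlib
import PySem

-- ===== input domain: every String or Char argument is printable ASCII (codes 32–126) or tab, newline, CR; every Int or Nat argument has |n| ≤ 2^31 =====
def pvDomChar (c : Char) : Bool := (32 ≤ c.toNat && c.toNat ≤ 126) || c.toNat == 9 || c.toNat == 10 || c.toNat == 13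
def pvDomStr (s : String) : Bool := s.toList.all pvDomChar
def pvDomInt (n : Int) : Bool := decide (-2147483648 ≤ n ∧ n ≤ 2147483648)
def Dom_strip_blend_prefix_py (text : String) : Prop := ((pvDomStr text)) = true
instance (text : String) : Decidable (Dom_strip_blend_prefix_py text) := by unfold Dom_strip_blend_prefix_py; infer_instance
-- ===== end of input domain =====

-- B replaces A's length-sorted scan over all prefixes with one find of ", " and a single set lookup (objective: simpler).

-- ===== PORT A =====
-- sorted(_BLEND_PREFIXES, key=len, reverse=True); A's result does not depend on how
-- equal-length prefixes tie (at most one token can match, see proofs below)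
def blendPrefixesSorted : List String :=
  ["version that survives contact", "if we're scoring rigor", "let's tighten this",
   "quick calibration", "small correction", "clean room pass", "quick question",
   "reality check", "premise first", "premise check", "mechanically", "translation",
   "in one line", "plain terms", "diagnosis"]

-- the for-loop of A: first prefix whose token starts lowered wins, else cleaned
def stripLoopA (cleaned lowered : String) : List String → String
  | [] => cleaned
  | p :: rest =>
    let token := p ++ ", "
    if PySem.Str.startswith lowered token then
      PySem.Str.strip (PySem.Str.slice cleaned (some (PySem.Str.len token)) none)
    else stripLoopA cleaned lowered rest

def strip_blend_prefix_py (text : String) : String :=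
  let cleaned := PySem.Str.join " " (PySem.Str.split₀ (PySem.Str.strip text))
  let lowered := PySem.Str.lower cleaned
  stripLoopA cleaned lowered blendPrefixesSorted

-- ===== PORT B =====
def blendSet : PySem.Set String :=
  PySem.Set.ofList
    ["small correction", "premise check", "quick calibration", "translation",
     "let's tighten this", "version that survives contact", "if we're scoring rigor",
     "mechanically", "clean room pass", "diagnosis", "reality check", "in one line",
     "plain terms", "premise first", "quick question"]

def strip_blend_prefix_py_alt (text : String) : String :=
  let cleaned := PySem.Str.join " " (PySem.Str.split₀ (PySem.Str.strip text))
  let lowered := PySem.Str.lower cleaned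
  let i := PySem.Str.find lowered ", "
  if i ≠ -1 && PySem.Set.contains blendSet (PySem.Str.slice lowered none (some i)) then
    PySem.Str.strip (PySem.Str.slice cleaned (some (i + 2)) none)
  else cleaned

-- ===== PRECONDITION & SPEC =====
def Spec_strip_blend_prefix_py (text : String) (out : String) : Prop := out = strip_blend_prefix_py_alt text
instance (text : String) (out : String) : Decidable (Spec_strip_blend_prefix_py text out) := by unfold Spec_strip_blend_prefix_py; infer_instance

-- ===== CLAIM (what is proved, stated in full; the proofs are below) =====
def Claim_equal_strip_blend_prefix_py : Prop := ∀ (text : String), Dom_strip_blend_prefix_py text → Spec_strip_blend_prefix_py text (strip_blend_prefix_py text)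

-- ===== LEMMAS AND PROOFS =====

-- if lowered starts with the token of a comma-free p, the first comma-space is at index |p|
lemma find_token (lw p : List Char) (hc : ',' ∉ p)
    (hpre : p ++ [',', ' '] <+: lw) :
    PySem.Chars.find lw [',', ' '] = (p.length : Int) := by
  obtain ⟨t, ht⟩ := hpre
  have hat : [',', ' '] <+: lw.drop p.length := by
    rw [← ht, List.append_assoc, List.drop_left]
    exact ⟨t, by simp⟩
  have hbelow : ∀ j < p.length, ¬ [',', ' '] <+: lw.drop j := by
    intro j hj hpref
    obtain ⟨t2, ht2⟩ := hpref
    have hdrop : lw.drop j = p.drop j ++ ([',', ' '] ++ t) := by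
      rw [← ht, List.append_assoc, List.drop_append_of_le_length (le_of_lt hj)]
    rw [hdrop, List.drop_eq_getElem_cons hj] at ht2
    have ht2' : ',' :: (' ' :: t2) = p[j] :: (p.drop (j+1) ++ ([',', ' '] ++ t)) := ht2
    injection ht2' with h1 _
    exact hc (h1 ▸ p.getElem_mem hj)
  have hnn : 0 ≤ PySem.Chars.find lw [',', ' '] := by
    rw [PySem.Chars.find_nonneg_iff]
    exact ⟨p, t, ht⟩
  obtain ⟨hfat, hfmin⟩ := PySem.Chars.find_spec hnn
  have heq : (PySem.Chars.find lw [',', ' ']).toNat = p.length := by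
    rcases lt_trichotomy (PySem.Chars.find lw [',', ' ']).toNat p.length with h | h | h
    · exact absurd hfat (hbelow _ h)
    · exact h
    · exact absurd hat (hfmin _ h)
  omega

-- every prefix in A's list is comma-free
lemma prefixes_comma_free : ∀ p ∈ blendPrefixesSorted, ',' ∉ p.toList := by decide

-- A's sorted list and B's set hold the same prefixes
lemma mem_blendSet_iff (p : String) : p ∈ blendSet ↔ p ∈ blendPrefixesSorted := by
  rw [blendSet, PySem.Set.mem_ofList]
  simp only [blendPrefixesSorted, List.mem_cons, List.not_mem_nil]
  tauto

-- token startswith, at the list level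
lemma startswith_token_iff (lowered p : String) :
    PySem.Str.startswith lowered (p ++ ", ") = true ↔
      p.toList ++ [',', ' '] <+: lowered.toList := by
  rw [PySem.Str.startswith_eq, PySem.Chars.startswith_iff, String.toList_append]
  rfl

-- A's loop when no prefix matches
lemma loop_no_match (cleaned lowered : String) (L : List String)
    (h : ∀ p ∈ L, ¬ PySem.Str.startswith lowered (p ++ ", ") = true) :
    stripLoopA cleaned lowered L = cleaned := by
  induction L with
  | nil => rfl
  | cons q rest ih =>
    have hq := h q (List.mem_cons_self ..)
    simp only [stripLoopA, Bool.not_eq_true] at hq ⊢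
    rw [hq]
    exact ih fun p hp => h p (List.mem_cons_of_mem _ hp)

-- A's loop when some prefix matches: every matching prefix has the same length m
lemma loop_match (cleaned lowered : String) (m : Nat) (L : List String) (p : String)
    (hmem : p ∈ L)
    (hsw : PySem.Str.startswith lowered (p ++ ", ") = true)
    (hlen : ∀ q ∈ L, PySem.Str.startswith lowered (q ++ ", ") = true → q.toList.length = m) :
    stripLoopA cleaned lowered L =
      PySem.Str.strip (PySem.Str.slice cleaned (some ((m : Int) + 2)) none) := by
  induction L with
  | nil => cases hmem
  | cons q rest ih =>
    by_cases hq : PySem.Str.startswith lowered (q ++ ", ") = true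
    · simp only [stripLoopA, hq, if_true]
      have hm := hlen q (List.mem_cons_self ..) hq
      have : PySem.Str.len (q ++ ", ") = (m : Int) + 2 := by
        rw [PySem.Str.len_eq, String.toList_append, List.length_append, hm]
        simp
      rw [this]
    · simp only [stripLoopA, hq]
      have hpq : p ∈ rest := by
        rcases List.mem_cons.mp hmem with h | h
        · exact absurd (h ▸ hsw) hq
        · exact h
      exact ih hpq fun r hr => hlen r (List.mem_cons_of_mem _ hr)

-- the core equivalence, for arbitrary cleaned/lowered
lemma loop_eq_find (cleaned lowered : String) :
    stripLoopA cleaned lowered blendPrefixesSorted =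
      (let i := PySem.Str.find lowered ", "
       if i ≠ -1 && PySem.Set.contains blendSet (PySem.Str.slice lowered none (some i)) then
         PySem.Str.strip (PySem.Str.slice cleaned (some (i + 2)) none)
       else cleaned) := by
  simp only []
  have hfind : PySem.Str.find lowered ", " = PySem.Chars.find lowered.toList [',', ' '] := by
    rw [PySem.Str.find_eq]; rfl
  by_cases hmatch : ∃ p ∈ blendPrefixesSorted, PySem.Str.startswith lowered (p ++ ", ") = true
  · obtain ⟨p, hp, hsw⟩ := hmatch
    have hpre := (startswith_token_iff lowered p).mp hsw
    have hi : PySem.Chars.find lowered.toList [',', ' '] = (p.toList.length : Int) :=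
      find_token _ _ (prefixes_comma_free p hp) hpre
    have hslice : PySem.Str.slice lowered none (some (PySem.Str.find lowered ", ")) = p := by
      rw [← String.toList_inj, PySem.Str.toList_slice, PySem.Chars.slice_eq_listSlice,
        hfind, hi, PySem.List.slice_to _ (Int.natCast_nonneg _)]
      obtain ⟨t, ht⟩ := hpre
      rw [← ht, List.append_assoc]
      exact List.take_left' (by simp)
    have hcond : (PySem.Str.find lowered ", " ≠ -1 &&
        PySem.Set.contains blendSet (PySem.Str.slice lowered none (some (PySem.Str.find lowered ", ")))) = true := by
      rw [hslice]
      have h1 : PySem.Str.find lowered ", " ≠ -1 := by rw [hfind, hi]; omega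
      have h2 : p ∈ blendSet := (mem_blendSet_iff p).mpr hp
      simp only [Bool.and_eq_true, decide_eq_true_eq]
      exact ⟨h1, by simpa [PySem.Set.contains] using h2⟩
    rw [if_pos hcond, hfind, hi]
    exact loop_match cleaned lowered p.toList.length _ p hp hsw
      (fun q hq hqsw => by
        have h2 := hi
        rw [find_token lowered.toList q.toList (prefixes_comma_free q hq)
          ((startswith_token_iff lowered q).mp hqsw)] at h2
        exact_mod_cast h2)
  · push Not at hmatch
    rw [loop_no_match cleaned lowered _ hmatch]
    rcases eq_or_ne (PySem.Str.find lowered ", ") (-1) with hneg | hpos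
    · rw [hfind] at hneg
      simp [hneg]
    · have hnn : 0 ≤ PySem.Chars.find lowered.toList [',', ' '] := by
        have := PySem.Chars.neg_one_le_find lowered.toList [',', ' ']
        rw [hfind] at hpos
        omega
      obtain ⟨hfat, -⟩ := PySem.Chars.find_spec hnn
      have hnotmem : PySem.Str.slice lowered none
          (some (PySem.Chars.find lowered.toList [',', ' '])) ∉ blendSet := by
        intro hqmem
        have hqtake : (PySem.Str.slice lowered none
            (some (PySem.Chars.find lowered.toList [',', ' ']))).toList
            = lowered.toList.take (PySem.Chars.find lowered.toList [',', ' ']).toNat := by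
          rw [PySem.Str.toList_slice, PySem.Chars.slice_eq_listSlice, PySem.List.slice_to _ hnn]
        have hqsw : PySem.Str.startswith lowered ((PySem.Str.slice lowered none
            (some (PySem.Chars.find lowered.toList [',', ' ']))) ++ ", ") = true := by
          rw [startswith_token_iff, hqtake]
          obtain ⟨t, ht⟩ := hfat
          exact ⟨t, by rw [List.append_assoc, ht, List.take_append_drop]⟩
        exact hmatch _ ((mem_blendSet_iff _).mp hqmem) hqsw
      simp
      intro _ hmem
      exact absurd hmem hnotmem

-- ===== VERDICT (by name: the statement is the Claim_ definition above) =====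
theorem strip_blend_prefix_py_spec : Claim_equal_strip_blend_prefix_py := by
  intro text _
  unfold Spec_strip_blend_prefix_py strip_blend_prefix_py strip_blend_prefix_py_alt
  exact loop_eq_find _ _
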